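-- pv_equiv track=rewrite | github.com/asoriano-stratio/prototype_presence_control | helper_functions_analysis.py | split_unknown
-- ===== SOURCE A (Python) =====
-- def split_unknown(unknown_persons, db_face_names, db_face_embeddings, db_img_paths, db_img_sizes):
--
--     faces_unknown = []
--     face_embeddings_unknown = []
--     path_unknown = []
--     sizes_unknown = []
--     for u in unknown_persons:
--         u_idx = [i for i, n in enumerate(db_face_names) if n == u]
--         names = [u for _ in range(len(u_idx))]
--         emb = [db_face_embeddings[i] for i in u_idx]
--         faces_unknown.extend(names)
--         face_embeddings_unknown.extend(emb)
--         path_unknown.extend([db_img_paths[i] for i in u_idx])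
--         sizes_unknown.extend([db_img_sizes[i] for i in u_idx])
--
--         db_face_names = [i for j, i in enumerate(db_face_names) if j not in u_idx]
--         db_face_embeddings = [i for j, i in enumerate(db_face_embeddings) if j not in u_idx]
--         db_img_paths = [i for j, i in enumerate(db_img_paths) if j not in u_idx]
--         db_img_sizes = [i for j, i in enumerate(db_img_sizes) if j not in u_idx]
--
--     return db_face_names, db_face_embeddings, db_img_paths, db_img_sizes, faces_unknown, face_embeddings_unknown, path_unknown, sizes_unknown
-- ===== SOURCE B (Python) =====
-- def split_unknown(unknown_persons, db_face_names, db_face_embeddings, db_img_paths, db_img_sizes):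
--     # One pass over the db builds a name -> [record index] table and the matched-index set;
--     # then the remainder lists are single comprehensions and each unknown person's rows are
--     # emitted straight from the table (duplicates in unknown_persons skipped via `seen`).
--     unk = set(unknown_persons)
--     groups = {}
--     matched = set()
--     for j, n in enumerate(db_face_names):
--         if n in unk:
--             groups.setdefault(n, []).append(j)
--             matched.add(j)
--     rest_names = [x for j, x in enumerate(db_face_names) if j not in matched]
--     rest_emb = [x for j, x in enumerate(db_face_embeddings) if j not in matched]
--     rest_paths = [x for j, x in enumerate(db_img_paths) if j not in matched]
--     rest_sizes = [x for j, x in enumerate(db_img_sizes) if j not in matched]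
--     seen = set()
--     faces_unknown = []
--     face_embeddings_unknown = []
--     path_unknown = []
--     sizes_unknown = []
--     for u in unknown_persons:
--         if u in seen:
--             continue
--         seen.add(u)
--         for j in groups.get(u, []):
--             faces_unknown.append(u)
--             face_embeddings_unknown.append(db_face_embeddings[j])
--             path_unknown.append(db_img_paths[j])
--             sizes_unknown.append(db_img_sizes[j])
--     return rest_names, rest_emb, rest_paths, rest_sizes, faces_unknown, face_embeddings_unknown, path_unknown, sizes_unknown
-- ===== Notes on version B (the rewrite author's own statement) =====
-- stated objective: faster
-- what changed: A rescans db_face_names once per unknown person and rebuilds all four db lists after each person (list membership tests against u_idx inside comprehensions); B makes one pass over enumerate(db_face_names) building a name->indices dict and a matched-index set, takes the remainders with single comprehensions, and emits each distinct unknown person's rows straight from the dict.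
import Mathlib
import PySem

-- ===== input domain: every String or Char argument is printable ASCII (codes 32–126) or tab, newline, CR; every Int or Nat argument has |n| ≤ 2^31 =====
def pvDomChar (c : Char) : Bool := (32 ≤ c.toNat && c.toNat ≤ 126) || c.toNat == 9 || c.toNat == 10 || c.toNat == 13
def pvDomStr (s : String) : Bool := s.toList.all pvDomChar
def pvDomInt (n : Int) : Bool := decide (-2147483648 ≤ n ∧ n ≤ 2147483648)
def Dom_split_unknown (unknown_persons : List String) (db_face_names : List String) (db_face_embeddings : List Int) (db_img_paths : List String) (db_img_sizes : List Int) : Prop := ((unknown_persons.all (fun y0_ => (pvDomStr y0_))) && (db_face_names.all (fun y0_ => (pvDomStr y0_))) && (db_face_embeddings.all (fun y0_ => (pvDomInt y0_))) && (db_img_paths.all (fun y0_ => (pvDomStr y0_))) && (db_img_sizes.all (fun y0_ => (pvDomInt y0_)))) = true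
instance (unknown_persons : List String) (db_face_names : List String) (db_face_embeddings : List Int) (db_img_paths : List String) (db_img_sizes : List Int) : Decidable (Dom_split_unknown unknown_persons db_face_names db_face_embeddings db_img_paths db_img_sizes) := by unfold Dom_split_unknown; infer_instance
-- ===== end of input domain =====

-- B replaces A's per-person rescan-and-rebuild of the four db lists by one grouping pass
-- (name -> record indices) plus single-comprehension remainders; same return value on Pre_.

-- ===== PORT A =====
-- [i for j, i in enumerate(xs) if j not in idxs]
def pyRemoveAt {α : Type} (xs : List α) (idxs : List Int) : List α :=
  ((PySem.List.enumerate xs 0).filter (fun p => !(idxs.contains p.1))).map (·.2)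

-- the for-loop of A over unknown_persons, state = the four db lists + the four output lists.
-- db_face_embeddings[i] is ported as pyGetD (IndexError = out-of-range fetch is excluded by Pre_).
def goA : List String → List String → List Int → List String → List Int →
    List String → List Int → List String → List Int →
    List String × List Int × List String × List Int × List String × List Int × List String × List Int
  | [], N, E, P, S, fa, fe, fp, fs => (N, E, P, S, fa, fe, fp, fs)
  | u :: us, N, E, P, S, fa, fe, fp, fs =>
    let uIdx : List Int := ((PySem.List.enumerate N 0).filter (fun p => p.2 == u)).map (·.1)
    let names := (PySem.List.pyRange 0 (uIdx.length : Int) 1).map (fun _ => u)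
    let emb := uIdx.map (fun i => PySem.List.pyGetD E i 0)
    let paths := uIdx.map (fun i => PySem.List.pyGetD P i "")
    let sizes := uIdx.map (fun i => PySem.List.pyGetD S i 0)
    goA us (pyRemoveAt N uIdx) (pyRemoveAt E uIdx) (pyRemoveAt P uIdx) (pyRemoveAt S uIdx)
      (fa ++ names) (fe ++ emb) (fp ++ paths) (fs ++ sizes)

def split_unknown (unknown_persons : List String) (db_face_names : List String) (db_face_embeddings : List Int) (db_img_paths : List String) (db_img_sizes : List Int) : List String × List Int × List String × List Int × List String × List Int × List String × List Int :=
  goA unknown_persons db_face_names db_face_embeddings db_img_paths db_img_sizes [] [] [] []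

-- ===== PORT B =====
def split_unknown_alt (unknown_persons : List String) (db_face_names : List String) (db_face_embeddings : List Int) (db_img_paths : List String) (db_img_sizes : List Int) : List String × List Int × List String × List Int × List String × List Int × List String × List Int :=
  let unk : PySem.Set String := PySem.Set.ofList unknown_persons
  -- for j, n in enumerate(db_face_names): if n in unk: groups.setdefault(n, []).append(j); matched.add(j)
  let gm : PySem.Dict String (List Int) × PySem.Set Int :=
    (PySem.List.enumerate db_face_names 0).foldl
      (fun st p => if unk.contains p.2 then (st.1.modify p.2 [] (· ++ [p.1]), st.2.add p.1) else st)
      (PySem.Dict.empty, PySem.Set.empty)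
  let groups := gm.1
  let matched := gm.2
  let restN := ((PySem.List.enumerate db_face_names 0).filter (fun p => !(matched.contains p.1))).map (·.2)
  let restE := ((PySem.List.enumerate db_face_embeddings 0).filter (fun p => !(matched.contains p.1))).map (·.2)
  let restP := ((PySem.List.enumerate db_img_paths 0).filter (fun p => !(matched.contains p.1))).map (·.2)
  let restS := ((PySem.List.enumerate db_img_sizes 0).filter (fun p => !(matched.contains p.1))).map (·.2)
  -- for u in unknown_persons: if u in seen: continue; seen.add(u); for j in groups.get(u, []): append rows
  let fin : PySem.Set String × List String × List Int × List String × List Int :=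
    unknown_persons.foldl
      (fun st u =>
        if st.1.contains u then st
        else
          let idxs := groups.getD u []
          (st.1.add u,
           st.2.1 ++ idxs.map (fun _ => u),
           st.2.2.1 ++ idxs.map (fun i => PySem.List.pyGetD db_face_embeddings i 0),
           st.2.2.2.1 ++ idxs.map (fun i => PySem.List.pyGetD db_img_paths i ""),
           st.2.2.2.2 ++ idxs.map (fun i => PySem.List.pyGetD db_img_sizes i 0)))
      (PySem.Set.empty, [], [], [], [])
  (restN, restE, restP, restS, fin.2.1, fin.2.2.1, fin.2.2.2.1, fin.2.2.2.2)

-- ===== PRECONDITION & SPEC =====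
-- Pre_ = exactly the inputs where Python A returns: every db record whose name is an unknown
-- person must have its index in range of the other three db lists (otherwise A raises IndexError).
def Pre_split_unknown (unknown_persons : List String) (db_face_names : List String) (db_face_embeddings : List Int) (db_img_paths : List String) (db_img_sizes : List Int) : Prop :=
  ∀ j : Nat, j < db_face_names.length → db_face_names.getD j "" ∈ unknown_persons →
    j < db_face_embeddings.length ∧ j < db_img_paths.length ∧ j < db_img_sizes.length
instance (unknown_persons : List String) (db_face_names : List String) (db_face_embeddings : List Int) (db_img_paths : List String) (db_img_sizes : List Int) : Decidable (Pre_split_unknown unknown_persons db_face_names db_face_embeddings db_img_paths db_img_sizes) := by unfold Pre_split_unknown; infer_instance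
def pvWitness_split_unknown : List String × List String × List Int × List String × List Int :=
  (["ann", "bob"], ["bob", "cat", "ann", "bob"], [1, 2, 3, 4], ["p", "q", "r", "s"], [7, 8, 9, 10])

def Spec_split_unknown (unknown_persons : List String) (db_face_names : List String) (db_face_embeddings : List Int) (db_img_paths : List String) (db_img_sizes : List Int) (out : List String × List Int × List String × List Int × List String × List Int × List String × List Int) : Prop := out = split_unknown_alt unknown_persons db_face_names db_face_embeddings db_img_paths db_img_sizes
instance (unknown_persons : List String) (db_face_names : List String) (db_face_embeddings : List Int) (db_img_paths : List String) (db_img_sizes : List Int) (out : List String × List Int × List String × List Int × List String × List Int × List String × List Int) : Decidable (Spec_split_unknown unknown_persons db_face_names db_face_embeddings db_img_paths db_img_sizes out) := by unfold Spec_split_unknown; simp only [Prod.ext_iff]; infer_instance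

-- ===== CLAIM (what is proved, stated in full; the proofs are below) =====
def Claim_equal_split_unknown : Prop := ∀ (unknown_persons : List String) (db_face_names : List String) (db_face_embeddings : List Int) (db_img_paths : List String) (db_img_sizes : List Int), Dom_split_unknown unknown_persons db_face_names db_face_embeddings db_img_paths db_img_sizes → Pre_split_unknown unknown_persons db_face_names db_face_embeddings db_img_paths db_img_sizes → Spec_split_unknown unknown_persons db_face_names db_face_embeddings db_img_paths db_img_sizes (split_unknown unknown_persons db_face_names db_face_embeddings db_img_paths db_img_sizes)

-- ===== LEMMAS AND PROOFS =====

-- `fidx keep j xs` = the (index, value) pairs of xs (indices starting at j) at kept indices.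
def fidx {α : Type} (keep : Nat → Bool) : Nat → List α → List (Nat × α)
  | _, [] => []
  | j, x :: xs => (if keep j then [(j, x)] else []) ++ fidx keep (j + 1) xs

-- number of kept indices below p
def cnt (keep : Nat → Bool) : Nat → Nat
  | 0 => 0
  | p + 1 => cnt keep p + (if keep p then 1 else 0)

def sel {α : Type} (keep : Nat → Bool) (xs : List α) : List α := (fidx keep 0 xs).map (·.2)

-- "record j of N exists and is named u"
def hitN (N : List String) (u : String) (j : Nat) : Bool := decide (j < N.length) && (N.getD j "" == u)

def oidx (N : List String) (keep : Nat → Bool) (u : String) : List Nat :=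
  ((fidx keep 0 N).filter (fun p => p.2 == u)).map (·.1)

def restKeep (N : List String) : List String → (Nat → Bool) → (Nat → Bool)
  | [], keep => keep
  | u :: us, keep => restKeep N us (fun j => keep j && !hitN N u j)

def gEmit (N : List String) (E : List Int) (P : List String) (S : List Int) :
    List String → (Nat → Bool) → List String × List Int × List String × List Int
  | [], _ => ([], [], [], [])
  | u :: us, keep =>
    let I := oidx N keep u
    let r := gEmit N E P S us (fun j => keep j && !hitN N u j)
    (I.map (fun _ => u) ++ r.1, I.map (fun q => E.getD q 0) ++ r.2.1,
     I.map (fun q => P.getD q "") ++ r.2.2.1, I.map (fun q => S.getD q 0) ++ r.2.2.2)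

theorem fidx_congr {α : Type} {keep keep' : Nat → Bool} (h : ∀ i, keep i = keep' i)
    (j : Nat) (xs : List α) : fidx keep j xs = fidx keep' j xs := by
  have : keep = keep' := funext h
  rw [this]

theorem sel_true {α : Type} (xs : List α) : ∀ j, (fidx (fun _ => true) j xs).map (·.2) = xs := by
  induction xs with
  | nil => intro j; rfl
  | cons x xs ih => intro j; simp [fidx, ih]

theorem fidx_nil_pred {α : Type} (xs : List α) : ∀ j, fidx (fun _ => false) j xs = [] := by
  induction xs with
  | nil => intro j; rfl
  | cons x xs ih => intro j; simp [fidx, ih]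

theorem enumerate_eq_fidx {α : Type} (xs : List α) : ∀ j : Nat,
    PySem.List.enumerate xs (j : Int) = (fidx (fun _ => true) j xs).map (fun p => ((p.1 : Int), p.2)) := by
  induction xs with
  | nil => intro j; simp [PySem.List.enumerate, fidx]
  | cons x xs ih =>
    intro j
    rw [PySem.List.enumerate_cons]
    have : ((j : Int) + 1) = ((j + 1 : Nat) : Int) := by push_cast; ring
    rw [this, ih (j + 1)]
    simp [fidx]

theorem mem_fidx {α : Type} (keep : Nat → Bool) (xs : List α) : ∀ (j : Nat) (p : Nat × α),
    p ∈ fidx keep j xs ↔ ∃ k, ∃ h : k < xs.length, p.1 = j + k ∧ keep (j + k) = true ∧ p.2 = xs[k] := by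
  induction xs with
  | nil => intro j p; simp [fidx]
  | cons x xs ih =>
    intro j p
    constructor
    · intro hp
      simp only [fidx, List.mem_append] at hp
      rcases hp with hp | hp
      · by_cases hk : keep j
        · simp [hk] at hp
          exact ⟨0, by simp, by simp [hp], by simpa [hp] using hk, by simp [hp]⟩
        · simp [hk] at hp
      · rcases (ih (j + 1) p).mp hp with ⟨k, hk, h1, h2, h3⟩
        exact ⟨k + 1, by simpa using hk, by omega, by
          have : j + (k + 1) = j + 1 + k := by omega
          rw [this]; exact h2, by simpa using h3⟩
    · rintro ⟨k, hk, h1, h2, h3⟩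
      simp only [fidx, List.mem_append]
      cases k with
      | zero =>
        left
        simp at h1 h2 h3
        simp [h2, Prod.ext_iff, h1, h3]
      | succ k =>
        right
        apply (ih (j + 1) p).mpr
        exact ⟨k, by simpa using hk, by omega, by
          have : j + 1 + k = j + (k + 1) := by omega
          rw [this]; exact h2, by simpa using h3⟩

theorem keep_of_mem_fidx {α : Type} {keep : Nat → Bool} {xs : List α} {j : Nat} {p : Nat × α}
    (hp : p ∈ fidx keep j xs) : keep p.1 = true := by
  rcases (mem_fidx keep xs j p).mp hp with ⟨k, hk, h1, h2, _⟩
  rw [h1]; exact h2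

theorem cnt_mono (keep : Nat → Bool) {a b : Nat} (h : a ≤ b) : cnt keep a ≤ cnt keep b := by
  induction b with
  | zero =>
    have : a = 0 := by omega
    subst this; exact Nat.le_refl _
  | succ b ih =>
    by_cases h' : a = b + 1
    · subst h'; exact Nat.le_refl _
    · have h1 : cnt keep a ≤ cnt keep b := ih (by omega)
      have h2 : cnt keep (b + 1) = cnt keep b + (if keep b then 1 else 0) := rfl
      rw [h2]; split <;> omega

theorem cnt_lt (keep : Nat → Bool) {a b : Nat} (h : a < b) (ha : keep a = true) :
    cnt keep a < cnt keep b := by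
  have h1 : cnt keep (a + 1) = cnt keep a + 1 := by simp [cnt, ha]
  have := cnt_mono keep (show a + 1 ≤ b by omega)
  omega

theorem cnt_inj {keep : Nat → Bool} {a b : Nat} (ha : keep a = true) (hb : keep b = true)
    (h : cnt keep a = cnt keep b) : a = b := by
  rcases Nat.lt_trichotomy a b with h' | h' | h'
  · have := cnt_lt keep h' ha; omega
  · exact h'
  · have := cnt_lt keep h' hb; omega

theorem fidx_fetch {α : Type} (keep : Nat → Bool) (d : α) (xs : List α) : ∀ j p : Nat, j ≤ p → keep p = true →
    ((fidx keep j xs).map (·.2)).getD (cnt keep p - cnt keep j) d = xs.getD (p - j) d := by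
  induction xs with
  | nil => intro j p _ _; simp [fidx]
  | cons x xs ih =>
    intro j p hjp hkp
    by_cases hk : keep j
    · rcases Nat.eq_or_lt_of_le hjp with h | h
      · subst h; simp [fidx, hk]
      · have h1 : cnt keep (j + 1) = cnt keep j + 1 := by simp [cnt, hk]
        have h2 : cnt keep j < cnt keep p := cnt_lt keep h hk
        have h3 : cnt keep (j + 1) ≤ cnt keep p := cnt_mono keep (by omega)
        simp only [fidx, hk, if_pos, List.map_append]
        have hidx : cnt keep p - cnt keep j = (cnt keep p - cnt keep (j + 1)) + 1 := by omega
        rw [hidx]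
        simp only [List.map_cons, List.map_nil, List.cons_append, List.nil_append, List.getD_cons_succ]
        rw [ih (j + 1) p (by omega) hkp]
        have : p - j = (p - (j + 1)) + 1 := by omega
        rw [this, List.getD_cons_succ]
    · have hne : j ≠ p := by rintro rfl; simp [hk] at hkp
      have h1 : cnt keep (j + 1) = cnt keep j := by simp [cnt, hk]
      simp only [fidx, hk]
      simp only [if_neg, List.nil_append, Bool.false_eq_true, not_false_iff]
      rw [← h1, ih (j + 1) p (by omega) hkp]
      have : p - j = (p - (j + 1)) + 1 := by omega
      rw [this, List.getD_cons_succ]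

theorem fidx_enum_sel {α : Type} (keep : Nat → Bool) (xs : List α) : ∀ j : Nat,
    fidx (fun _ => true) (cnt keep j) ((fidx keep j xs).map (·.2)) =
      (fidx keep j xs).map (fun p => (cnt keep p.1, p.2)) := by
  induction xs with
  | nil => intro j; rfl
  | cons x xs ih =>
    intro j
    by_cases hk : keep j
    · have h1 : cnt keep (j + 1) = cnt keep j + 1 := by simp [cnt, hk]
      simp only [fidx, hk, if_pos, List.map_append, List.map_cons, List.map_nil,
        List.cons_append, List.nil_append]
      rw [show cnt keep j + 1 = cnt keep (j + 1) from h1.symm] at *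
      simp [fidx, ← h1, ih (j + 1)]
    · have h1 : cnt keep (j + 1) = cnt keep j := by simp [cnt, hk]
      simp only [fidx, hk]
      simpa [← h1] using ih (j + 1)

theorem fidx_filter {α : Type} (keep : Nat → Bool) (q : Nat → Bool) (xs : List α) : ∀ j,
    (fidx keep j xs).filter (fun p => q p.1) = fidx (fun i => keep i && q i) j xs := by
  induction xs with
  | nil => intro j; rfl
  | cons x xs ih =>
    intro j
    by_cases hk : keep j <;> by_cases hq : q j <;>
      simp [fidx, hk, hq, List.filter_append, ih (j + 1)]

theorem enumerate_sel {α : Type} (keep : Nat → Bool) (xs : List α) :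
    PySem.List.enumerate (sel keep xs) 0 =
      (fidx keep 0 xs).map (fun p => ((cnt keep p.1 : Int), p.2)) := by
  rw [show (0 : Int) = ((0 : Nat) : Int) from rfl, enumerate_eq_fidx]
  have h := fidx_enum_sel keep xs 0
  simp only [show cnt keep 0 = 0 from rfl] at h
  unfold sel
  rw [h, List.map_map]
  rfl

theorem uIdx_eq (keep : Nat → Bool) (N : List String) (u : String) :
    ((PySem.List.enumerate (sel keep N) 0).filter (fun p => p.2 == u)).map (·.1) =
      ((fidx keep 0 N).filter (fun p => p.2 == u)).map (fun p => ((cnt keep p.1 : Int))) := by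
  rw [enumerate_sel, List.filter_map, List.map_map]
  rfl

theorem mem_uIdx_iff (keep : Nat → Bool) (N : List String) (u : String) {j : Nat}
    (hkj : keep j = true) :
    ((cnt keep j : Int) ∈ ((fidx keep 0 N).filter (fun p => p.2 == u)).map (fun p => ((cnt keep p.1 : Int)))) ↔ hitN N u j = true := by
  constructor
  · intro h
    rcases List.mem_map.mp h with ⟨q, hq, hcast⟩
    have hqf : q ∈ fidx keep 0 N := List.mem_of_mem_filter hq
    have hq2 : (q.2 == u) = true := (List.mem_filter.mp hq).2
    have hkq : keep q.1 = true := keep_of_mem_fidx hqf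
    have hcnt : cnt keep q.1 = cnt keep j := by exact_mod_cast hcast
    have hj : q.1 = j := cnt_inj hkq hkj hcnt
    rcases (mem_fidx keep N 0 q).mp hqf with ⟨k, hk, e1, _, e3⟩
    simp only [Nat.zero_add] at e1
    have hjN : j < N.length := by omega
    have hgd : N.getD j "" = u := by
      rw [List.getD_eq_getElem _ _ hjN]
      have : N[j] = q.2 := by subst hj e1; exact e3.symm
      rw [this]; exact eq_of_beq hq2
    have hge : N[j] = u := by rw [← List.getD_eq_getElem _ _ hjN]; exact hgd
    simp [hitN, hgd, hjN, hge]
  · intro h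
    simp only [hitN, Bool.and_eq_true, decide_eq_true_eq, beq_iff_eq] at h
    obtain ⟨hlt, hval⟩ := h
    apply List.mem_map.mpr
    refine ⟨(j, N[j]), ?_, rfl⟩
    apply List.mem_filter.mpr
    constructor
    · exact (mem_fidx keep N 0 (j, N[j])).mpr ⟨j, hlt, by simp, by simpa using hkj, by simp⟩
    · simp only [beq_iff_eq]
      rw [← List.getD_eq_getElem _ _ hlt]
      exact hval

theorem removeAt_eq {α : Type} (keep : Nat → Bool) (N : List String) (u : String) (X : List α) :
    pyRemoveAt (sel keep X)
        (((fidx keep 0 N).filter (fun p => p.2 == u)).map (fun p => ((cnt keep p.1 : Int)))) =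
      sel (fun j => keep j && !hitN N u j) X := by
  unfold pyRemoveAt
  rw [enumerate_sel, List.filter_map, List.map_map]
  have hcong : ∀ p ∈ fidx keep 0 X,
      ((fun p : Int × α => !(((fidx keep 0 N).filter (fun q => q.2 == u)).map (fun q => ((cnt keep q.1 : Int)))).contains p.1) ∘
        (fun p : Nat × α => ((cnt keep p.1 : Int), p.2))) p = (fun p : Nat × α => !hitN N u p.1) p := by
    intro p hp
    have hkp : keep p.1 = true := keep_of_mem_fidx hp
    simp only [Function.comp]
    have : (((fidx keep 0 N).filter (fun q => q.2 == u)).map (fun q => ((cnt keep q.1 : Int)))).contains ((cnt keep p.1 : Int)) = hitN N u p.1 := by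
      rw [Bool.eq_iff_iff, List.contains_iff_mem]
      exact mem_uIdx_iff keep N u hkp
    rw [this]
  rw [List.filter_congr hcong, fidx_filter keep (fun j => !hitN N u j) X 0]
  simp [sel, Function.comp]

theorem fetch_eq {α : Type} (keep : Nat → Bool) (N : List String) (u : String) (X : List α) (d : α) :
    (((fidx keep 0 N).filter (fun p => p.2 == u)).map (fun p => ((cnt keep p.1 : Int)))).map
        (fun i => PySem.List.pyGetD (sel keep X) i d) =
      (oidx N keep u).map (fun q => X.getD q d) := by
  unfold oidx
  rw [List.map_map, List.map_map]
  apply List.map_congr_left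
  intro p hp
  have hkp : keep p.1 = true := keep_of_mem_fidx (List.mem_of_mem_filter hp)
  simp only [Function.comp]
  rw [PySem.List.pyGetD_natCast]
  have := fidx_fetch keep d X 0 p.1 (Nat.zero_le _) hkp
  simpa [sel, cnt] using this

theorem names_eq (keep : Nat → Bool) (N : List String) (u : String) :
    (PySem.List.pyRange 0
        (((((fidx keep 0 N).filter (fun p => p.2 == u)).map (fun p => ((cnt keep p.1 : Int)))).length : Int)) 1).map
        (fun _ => u) =
      (oidx N keep u).map (fun _ => u) := by
  rw [List.map_const', List.map_const']
  congr 1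
  rw [PySem.List.pyRange_zero_natCast]
  simp [oidx]

theorem mainA (N : List String) (E : List Int) (P : List String) (S : List Int) :
    ∀ (us : List String) (keep : Nat → Bool) (fa : List String) (fe : List Int) (fp : List String) (fs : List Int),
    goA us (sel keep N) (sel keep E) (sel keep P) (sel keep S) fa fe fp fs =
      (sel (restKeep N us keep) N, sel (restKeep N us keep) E, sel (restKeep N us keep) P,
       sel (restKeep N us keep) S,
       fa ++ (gEmit N E P S us keep).1, fe ++ (gEmit N E P S us keep).2.1,
       fp ++ (gEmit N E P S us keep).2.2.1, fs ++ (gEmit N E P S us keep).2.2.2) := by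
  intro us
  induction us with
  | nil => intro keep fa fe fp fs; simp [goA, restKeep, gEmit]
  | cons u us ih =>
    intro keep fa fe fp fs
    simp only [goA]
    rw [uIdx_eq keep N u]
    rw [removeAt_eq keep N u N, removeAt_eq keep N u E, removeAt_eq keep N u P, removeAt_eq keep N u S]
    rw [fetch_eq keep N u E 0, fetch_eq keep N u P "", fetch_eq keep N u S 0]
    rw [names_eq keep N u]
    rw [ih (fun j => keep j && !hitN N u j)]
    simp only [restKeep, gEmit, List.append_assoc]

theorem sel_true_eq {α : Type} (xs : List α) : sel (fun _ => true) xs = xs := sel_true xs 0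

theorem sel_congr {α : Type} {keep keep' : Nat → Bool} (h : ∀ i, keep i = keep' i) (xs : List α) :
    sel keep xs = sel keep' xs := by
  unfold sel
  rw [fidx_congr h]

theorem gEmit_congr (N : List String) (E : List Int) (P : List String) (S : List Int)
    (us : List String) {keep keep' : Nat → Bool} (h : ∀ i, keep i = keep' i) :
    gEmit N E P S us keep = gEmit N E P S us keep' := by
  have : keep = keep' := funext h
  rw [this]

theorem oidx_eq (N : List String) (keep : Nat → Bool) (u : String) :
    oidx N keep u = (fidx (fun j => keep j && hitN N u j) 0 N).map (·.1) := by
  unfold oidx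
  have hcong : ∀ p ∈ fidx keep 0 N, (p.2 == u) = (fun p : Nat × String => hitN N u p.1) p := by
    intro p hp
    rcases (mem_fidx keep N 0 p).mp hp with ⟨k, hk, e1, _, e3⟩
    simp only [Nat.zero_add] at e1
    have hlt : p.1 < N.length := by omega
    have hg : N[p.1] = p.2 := by subst e1; exact e3.symm
    simp [hitN, hlt, hg]
  rw [List.filter_congr hcong, fidx_filter]

theorem foldPair1 (unk : PySem.Set String) (l : List (Int × String)) :
    ∀ (d : PySem.Dict String (List Int)) (s : PySem.Set Int),
    (l.foldl (fun st p => if unk.contains p.2 then (st.1.modify p.2 [] (· ++ [p.1]), st.2.add p.1) else st) (d, s)).1 =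
      l.foldl (fun d p => if unk.contains p.2 then d.modify p.2 [] (· ++ [p.1]) else d) d := by
  induction l with
  | nil => intro d s; rfl
  | cons p l ih =>
    intro d s
    rw [List.foldl_cons, List.foldl_cons]
    by_cases h : unk.contains p.2 = true
    · rw [if_pos h, if_pos h]; exact ih _ _
    · rw [if_neg h, if_neg h]; exact ih _ _

theorem foldPair2 (unk : PySem.Set String) (l : List (Int × String)) :
    ∀ (d : PySem.Dict String (List Int)) (s : PySem.Set Int),
    (l.foldl (fun st p => if unk.contains p.2 then (st.1.modify p.2 [] (· ++ [p.1]), st.2.add p.1) else st) (d, s)).2 =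
      l.foldl (fun s p => if unk.contains p.2 then s.add p.1 else s) s := by
  induction l with
  | nil => intro d s; rfl
  | cons p l ih =>
    intro d s
    rw [List.foldl_cons, List.foldl_cons]
    by_cases h : unk.contains p.2 = true
    · rw [if_pos h, if_pos h]; exact ih _ _
    · rw [if_neg h, if_neg h]; exact ih _ _

theorem contains_ofList (up : List String) (u : String) :
    (PySem.Set.ofList up).contains u = decide (u ∈ up) := by
  rw [Bool.eq_iff_iff]
  simp [PySem.Set.contains, List.contains_iff_mem, PySem.Set.mem_ofList]

theorem enum_zero_eq_fidx {α : Type} (xs : List α) :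
    PySem.List.enumerate xs 0 = (fidx (fun _ => true) 0 xs).map (fun p => ((p.1 : Int), p.2)) := by
  rw [show (0 : Int) = ((0 : Nat) : Int) from rfl, enumerate_eq_fidx]

theorem foldl_modify_swap (l : List (Int × String)) :
    ∀ d : PySem.Dict String (List Int),
    l.foldl (fun d p => d.modify p.2 [] (· ++ [p.1])) d =
      (l.map (fun p => (p.2, p.1))).foldl (fun d q => d.modify q.1 [] (· ++ [q.2])) d := by
  induction l with
  | nil => intro d; rfl
  | cons p l ih => intro d; simp only [List.foldl_cons, List.map_cons]; exact ih _

theorem groups_getD (up N : List String) (u : String) (hu : u ∈ up) :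
    ((PySem.List.enumerate N 0).foldl
        (fun d p => if (PySem.Set.ofList up).contains p.2 then d.modify p.2 [] (· ++ [p.1]) else d)
        PySem.Dict.empty).getD u [] =
      ((fidx (fun _ => true) 0 N).filter (fun p => p.2 == u)).map (fun p => ((p.1 : Int))) := by
  rw [PySem.List.foldl_if_eq_foldl_filter]
  rw [foldl_modify_swap]
  rw [PySem.Dict.getD_foldl_modify_append]
  rw [List.filter_map, List.map_map]
  simp only [PySem.Dict.getD_empty, List.nil_append]
  rw [List.filter_filter]
  have hcong : ∀ p ∈ PySem.List.enumerate N 0,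
      (((fun q : String × Int => q.1 == u) ∘ (fun p : Int × String => (p.2, p.1))) p && (PySem.Set.ofList up).contains p.2) = (fun p : Int × String => p.2 == u) p := by
    intro p _
    simp only [Function.comp]
    by_cases h : p.2 = u
    · simp [h, contains_ofList, hu]
    · simp [h]
  rw [List.filter_congr hcong, enum_zero_eq_fidx N, List.filter_map, List.map_map]
  rfl

theorem matched_eq (up N : List String) :
    ((PySem.List.enumerate N 0).foldl
        (fun s p => if (PySem.Set.ofList up).contains p.2 then s.add p.1 else s)
        PySem.Set.empty) =
      PySem.Set.ofList (((PySem.List.enumerate N 0).filter (fun p => (PySem.Set.ofList up).contains p.2)).map (·.1)) := by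
  rw [PySem.List.foldl_if_eq_foldl_filter]
  rw [← PySem.Set.update_map_eq_foldl_add, PySem.Set.update_empty]

theorem matched_contains (up N : List String) (j : Nat) :
    (PySem.Set.ofList (((PySem.List.enumerate N 0).filter
        (fun p => (PySem.Set.ofList up).contains p.2)).map (·.1))).contains ((j : Int)) =
      (decide (j < N.length) && decide (N.getD j "" ∈ up)) := by
  simp only [PySem.Set.contains]
  rw [Bool.eq_iff_iff, List.contains_iff_mem, PySem.Set.mem_ofList]
  rw [enum_zero_eq_fidx N, List.filter_map, List.map_map]
  constructor
  · intro h
    rcases List.mem_map.mp h with ⟨q, hq, hcast⟩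
    have hqf : q ∈ fidx (fun _ => true) 0 N := List.mem_of_mem_filter hq
    have hq2 := (List.mem_filter.mp hq).2
    simp only [Function.comp] at hq2 hcast
    have hj : q.1 = j := by exact_mod_cast hcast
    rcases (mem_fidx (fun _ => true) N 0 q).mp hqf with ⟨k, hk, e1, _, e3⟩
    simp only [Nat.zero_add] at e1
    have hlt : j < N.length := by omega
    have hmem : N.getD j "" ∈ up := by
      rw [List.getD_eq_getElem _ _ hlt]
      have : N[j] = q.2 := by subst hj e1; exact e3.symm
      rw [this]
      rw [List.contains_iff_mem, PySem.Set.mem_ofList] at hq2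
      exact hq2
    have hmem' : N[j] ∈ up := by rw [← List.getD_eq_getElem _ _ hlt]; exact hmem
    simp [hlt, hmem, hmem']
  · intro h
    simp only [Bool.and_eq_true, decide_eq_true_eq] at h
    obtain ⟨hlt, hmem⟩ := h
    apply List.mem_map.mpr
    refine ⟨(j, N[j]), ?_, rfl⟩
    apply List.mem_filter.mpr
    refine ⟨(mem_fidx (fun _ => true) N 0 (j, N[j])).mpr ⟨j, hlt, by simp, by simp, by simp⟩, ?_⟩
    simp only [Function.comp, contains_ofList]
    rw [← List.getD_eq_getElem _ _ hlt] at *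
    simpa using hmem

-- the canonical "record survives" predicate
def keepAll (up N : List String) (j : Nat) : Bool := !(decide (j < N.length) && decide (N.getD j "" ∈ up))

theorem restB {α : Type} (up N : List String) (X : List α) :
    ((PySem.List.enumerate X 0).filter
        (fun p => !((PySem.Set.ofList (((PySem.List.enumerate N 0).filter
          (fun p => (PySem.Set.ofList up).contains p.2)).map (·.1))).contains p.1))).map (·.2) =
      sel (keepAll up N) X := by
  rw [enum_zero_eq_fidx X, List.filter_map, List.map_map]
  have hcong : ∀ p ∈ fidx (fun _ => true) 0 X,
      ((fun q : Int × α => !((PySem.Set.ofList (((PySem.List.enumerate N 0).filter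
          (fun p => (PySem.Set.ofList up).contains p.2)).map (·.1))).contains q.1)) ∘
        (fun p : Nat × α => ((p.1 : Int), p.2))) p = (fun p : Nat × α => keepAll up N p.1) p := by
    intro p _
    simp only [Function.comp]
    rw [matched_contains]
    rfl
  rw [List.filter_congr hcong, fidx_filter]
  rw [fidx_congr (fun i => by simp : ∀ i, ((fun _ => true) i && keepAll up N i) = keepAll up N i)]
  rfl

theorem restKeep_apply (N : List String) :
    ∀ (us : List String) (keep : Nat → Bool) (j : Nat),
    restKeep N us keep j = (keep j && !(us.any (fun u => hitN N u j))) := by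
  intro us
  induction us with
  | nil => intro keep j; simp [restKeep]
  | cons u us ih =>
    intro keep j
    simp only [restKeep, ih, List.any_cons]
    cases keep j <;> cases hitN N u j <;> simp

theorem any_hit_eq (up N : List String) (j : Nat) :
    (up.any (fun u => hitN N u j)) = !keepAll up N j := by
  unfold keepAll
  by_cases hlt : j < N.length
  · simp only [hitN, hlt, decide_true, Bool.true_and, Bool.not_not]
    rw [Bool.eq_iff_iff]
    simp only [List.any_eq_true, beq_iff_eq, decide_eq_true_eq]
    constructor
    · rintro ⟨u, hu, he⟩; rw [he]; exact hu
    · intro h; exact ⟨N.getD j "", h, rfl⟩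
  · simp [hitN, hlt]

-- "record j survives" w.r.t. the names already emitted (B's `seen` set)
def keepOf (N : List String) (seen : PySem.Set String) (j : Nat) : Bool :=
  !(decide (j < N.length) && PySem.Set.contains seen (N.getD j ""))

theorem keepOf_empty (N : List String) : ∀ j, keepOf N PySem.Set.empty j = true := by
  intro j
  simp [keepOf, PySem.Set.empty, PySem.Set.contains]

theorem contains_add (s : PySem.Set String) (x y : String) :
    PySem.Set.contains (s.add x) y = (PySem.Set.contains s y || y == x) := by
  rw [Bool.eq_iff_iff]
  simp [PySem.Set.contains, List.contains_iff_mem, PySem.Set.mem_add]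

theorem keepOf_add (N : List String) (seen : PySem.Set String) (u : String) :
    ∀ j, keepOf N (seen.add u) j = (keepOf N seen j && !hitN N u j) := by
  intro j
  simp only [keepOf, contains_add, hitN]
  cases hL : decide (j < N.length) <;> cases hC : PySem.Set.contains seen (N.getD j "") <;>
    cases hE : (N.getD j "" == u) <;> simp

theorem keepOf_false_of_hit {N : List String} {seen : PySem.Set String} {u : String} {j : Nat}
    (hj : hitN N u j = true) (hc : PySem.Set.contains seen u = true) :
    keepOf N seen j = false := by
  simp only [hitN, Bool.and_eq_true, decide_eq_true_eq, beq_iff_eq] at hj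
  unfold keepOf
  rw [hj.2, hc]
  simp [hj.1]

theorem oidx_keepOf_of_contains (N : List String) (seen : PySem.Set String) (u : String)
    (hc : PySem.Set.contains seen u = true) : oidx N (keepOf N seen) u = [] := by
  rw [oidx_eq]
  rw [fidx_congr (keep' := fun _ => false)
    (by
      intro j
      by_cases hj : hitN N u j = true
      · simp [keepOf_false_of_hit hj hc]
      · simp [Bool.eq_false_iff.mpr hj])]
  rw [fidx_nil_pred]
  rfl

theorem keep_nothit_of_contains (N : List String) (seen : PySem.Set String) (u : String)
    (hc : PySem.Set.contains seen u = true) :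
    ∀ j, (keepOf N seen j && !hitN N u j) = keepOf N seen j := by
  intro j
  by_cases hj : hitN N u j = true
  · simp [hj, keepOf_false_of_hit hj hc]
  · simp [Bool.eq_false_iff.mpr hj]

theorem keepOf_true_of_hit {N : List String} {seen : PySem.Set String} {u : String} {j : Nat}
    (hj : hitN N u j = true) (hc : PySem.Set.contains seen u = false) :
    keepOf N seen j = true := by
  simp only [hitN, Bool.and_eq_true, decide_eq_true_eq, beq_iff_eq] at hj
  unfold keepOf
  rw [hj.2, hc]
  simp

theorem oidx_keepOf_of_not_contains (N : List String) (seen : PySem.Set String) (u : String)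
    (hc : PySem.Set.contains seen u = false) :
    oidx N (keepOf N seen) u = (fidx (fun j => hitN N u j) 0 N).map (·.1) := by
  rw [oidx_eq]
  rw [fidx_congr (keep' := fun j => hitN N u j)
    (by
      intro j
      by_cases hj : hitN N u j = true
      · simp [hj, keepOf_true_of_hit hj hc]
      · simp [Bool.eq_false_iff.mpr hj])]

theorem filter_true_eq_hit (N : List String) (u : String) :
    (fidx (fun _ => true) 0 N).filter (fun p => p.2 == u) = fidx (fun j => hitN N u j) 0 N := by
  have h := oidx_eq N (fun _ => true) u
  have hcong : ∀ p ∈ fidx (fun _ => true) 0 N, (p.2 == u) = (fun p : Nat × String => hitN N u p.1) p := by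
    intro p hp
    rcases (mem_fidx (fun _ => true) N 0 p).mp hp with ⟨k, hk, e1, _, e3⟩
    simp only [Nat.zero_add] at e1
    have hlt : p.1 < N.length := by omega
    have hg : N[p.1] = p.2 := by subst e1; exact e3.symm
    simp [hitN, hlt, hg]
  rw [List.filter_congr hcong, fidx_filter]
  exact fidx_congr (by intro i; simp) 0 N

theorem add_of_contains (s : PySem.Set String) (u : String)
    (hc : PySem.Set.contains s u = true) : s.add u = s := by
  unfold PySem.Set.add
  rw [if_pos hc]

theorem emitB (up N : List String) (E : List Int) (P : List String) (S : List Int)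
    (g : PySem.Dict String (List Int))
    (hg : ∀ u ∈ up, g.getD u [] =
      ((fidx (fun _ => true) 0 N).filter (fun p => p.2 == u)).map (fun p => ((p.1 : Int)))) :
    ∀ (us : List String) (seen : PySem.Set String) (fa : List String) (fe : List Int)
      (fp : List String) (fs : List Int), (∀ x ∈ us, x ∈ up) →
    us.foldl
      (fun st u =>
        if st.1.contains u then st
        else
          (st.1.add u,
           st.2.1 ++ (g.getD u []).map (fun _ => u),
           st.2.2.1 ++ (g.getD u []).map (fun i => PySem.List.pyGetD E i 0),
           st.2.2.2.1 ++ (g.getD u []).map (fun i => PySem.List.pyGetD P i ""),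
           st.2.2.2.2 ++ (g.getD u []).map (fun i => PySem.List.pyGetD S i 0)))
      (seen, fa, fe, fp, fs) =
      (us.foldl PySem.Set.add seen,
       fa ++ (gEmit N E P S us (keepOf N seen)).1,
       fe ++ (gEmit N E P S us (keepOf N seen)).2.1,
       fp ++ (gEmit N E P S us (keepOf N seen)).2.2.1,
       fs ++ (gEmit N E P S us (keepOf N seen)).2.2.2) := by
  intro us
  induction us with
  | nil => intro seen fa fe fp fs _; simp [gEmit]
  | cons u us ih =>
    intro seen fa fe fp fs h
    rw [List.foldl_cons, List.foldl_cons]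
    by_cases hc : PySem.Set.contains seen u = true
    · have hif : ((if (seen, fa, fe, fp, fs).1.contains u then (seen, fa, fe, fp, fs)
          else
            ((seen, fa, fe, fp, fs).1.add u,
             (seen, fa, fe, fp, fs).2.1 ++ (g.getD u []).map (fun _ => u),
             (seen, fa, fe, fp, fs).2.2.1 ++ (g.getD u []).map (fun i => PySem.List.pyGetD E i 0),
             (seen, fa, fe, fp, fs).2.2.2.1 ++ (g.getD u []).map (fun i => PySem.List.pyGetD P i ""),
             (seen, fa, fe, fp, fs).2.2.2.2 ++ (g.getD u []).map (fun i => PySem.List.pyGetD S i 0))) :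
          PySem.Set String × List String × List Int × List String × List Int) = (seen, fa, fe, fp, fs) := by
        simp only [hc]
        rfl
      rw [hif, ih seen fa fe fp fs (fun x hx => h x (List.mem_cons_of_mem u hx))]
      rw [add_of_contains seen u hc]
      have hsame : gEmit N E P S (u :: us) (keepOf N seen) = gEmit N E P S us (keepOf N seen) := by
        show (let I := oidx N (keepOf N seen) u
          let r := gEmit N E P S us (fun j => keepOf N seen j && !hitN N u j)
          (I.map (fun _ => u) ++ r.1, I.map (fun q => E.getD q 0) ++ r.2.1,
           I.map (fun q => P.getD q "") ++ r.2.2.1, I.map (fun q => S.getD q 0) ++ r.2.2.2)) = _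
        rw [oidx_keepOf_of_contains N seen u hc,
          gEmit_congr N E P S us (keep_nothit_of_contains N seen u hc)]
        simp
      rw [hsame]
    · have hcf : PySem.Set.contains seen u = false := Bool.eq_false_iff.mpr hc
      have hif : ((if (seen, fa, fe, fp, fs).1.contains u then (seen, fa, fe, fp, fs)
          else
            ((seen, fa, fe, fp, fs).1.add u,
             (seen, fa, fe, fp, fs).2.1 ++ (g.getD u []).map (fun _ => u),
             (seen, fa, fe, fp, fs).2.2.1 ++ (g.getD u []).map (fun i => PySem.List.pyGetD E i 0),
             (seen, fa, fe, fp, fs).2.2.2.1 ++ (g.getD u []).map (fun i => PySem.List.pyGetD P i ""),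
             (seen, fa, fe, fp, fs).2.2.2.2 ++ (g.getD u []).map (fun i => PySem.List.pyGetD S i 0))) :
          PySem.Set String × List String × List Int × List String × List Int) =
          (seen.add u,
           fa ++ (g.getD u []).map (fun _ => u),
           fe ++ (g.getD u []).map (fun i => PySem.List.pyGetD E i 0),
           fp ++ (g.getD u []).map (fun i => PySem.List.pyGetD P i ""),
           fs ++ (g.getD u []).map (fun i => PySem.List.pyGetD S i 0)) := by
        simp only [hcf]
        rfl
      rw [hif, ih (seen.add u) _ _ _ _ (fun x hx => h x (List.mem_cons_of_mem u hx))]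
      have hu : u ∈ up := h u List.mem_cons_self
      have hidx : g.getD u [] = (fidx (fun j => hitN N u j) 0 N).map (fun p => ((p.1 : Int))) := by
        rw [hg u hu]
        rw [show ((fidx (fun _ => true) 0 N).filter (fun p => p.2 == u)) =
          fidx (fun j => hitN N u j) 0 N from filter_true_eq_hit N u]
      have hoidx : oidx N (keepOf N seen) u = (fidx (fun j => hitN N u j) 0 N).map (·.1) :=
        oidx_keepOf_of_not_contains N seen u hcf
      have hkeep : ∀ j, keepOf N (seen.add u) j = (keepOf N seen j && !hitN N u j) :=
        keepOf_add N seen u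
      have hg1 : gEmit N E P S (u :: us) (keepOf N seen) =
          ((g.getD u []).map (fun _ => u) ++ (gEmit N E P S us (keepOf N (seen.add u))).1,
           (g.getD u []).map (fun i => PySem.List.pyGetD E i 0) ++ (gEmit N E P S us (keepOf N (seen.add u))).2.1,
           (g.getD u []).map (fun i => PySem.List.pyGetD P i "") ++ (gEmit N E P S us (keepOf N (seen.add u))).2.2.1,
           (g.getD u []).map (fun i => PySem.List.pyGetD S i 0) ++ (gEmit N E P S us (keepOf N (seen.add u))).2.2.2) := by
        show (let I := oidx N (keepOf N seen) u
          let r := gEmit N E P S us (fun j => keepOf N seen j && !hitN N u j)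
          (I.map (fun _ => u) ++ r.1, I.map (fun q => E.getD q 0) ++ r.2.1,
           I.map (fun q => P.getD q "") ++ r.2.2.1, I.map (fun q => S.getD q 0) ++ r.2.2.2)) = _
        rw [hoidx, hidx, ← gEmit_congr N E P S us hkeep]
        simp [List.map_map, Function.comp, PySem.List.pyGetD_natCast]
      rw [hg1]
      simp [List.append_assoc]

theorem altB (up N : List String) (E : List Int) (P : List String) (S : List Int) :
    split_unknown_alt up N E P S =
      (sel (keepAll up N) N, sel (keepAll up N) E, sel (keepAll up N) P, sel (keepAll up N) S,
       (gEmit N E P S up (fun _ => true)).1, (gEmit N E P S up (fun _ => true)).2.1,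
       (gEmit N E P S up (fun _ => true)).2.2.1, (gEmit N E P S up (fun _ => true)).2.2.2) := by
  simp only [split_unknown_alt]
  rw [foldPair1, foldPair2]
  rw [matched_eq up N]
  rw [restB up N N, restB up N E, restB up N P, restB up N S]
  rw [emitB up N E P S _ (fun u hu => groups_getD up N u hu) up PySem.Set.empty [] [] [] []
    (fun x hx => hx)]
  rw [gEmit_congr N E P S up (keepOf_empty N)]
  simp

-- ===== VERDICT =====
theorem split_unknown_spec : Claim_equal_split_unknown := by
  unfold Claim_equal_split_unknown
  intro up N E P S _ _
  unfold Spec_split_unknown split_unknown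
  rw [altB up N E P S]
  have h0 : goA up N E P S [] [] [] [] =
      goA up (sel (fun _ => true) N) (sel (fun _ => true) E) (sel (fun _ => true) P)
        (sel (fun _ => true) S) [] [] [] [] := by
    rw [sel_true_eq, sel_true_eq, sel_true_eq, sel_true_eq]
  rw [h0, mainA N E P S up (fun _ => true) [] [] [] []]
  have hk : ∀ j, restKeep N up (fun _ => true) j = keepAll up N j := by
    intro j
    rw [restKeep_apply, any_hit_eq]
    simp
  rw [sel_congr hk N, sel_congr hk E, sel_congr hk P, sel_congr hk S]
  simp
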